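-- pv_equiv track=rewrite | github.com/oulipoly/agent-software-developer-skill | scripts/lib/risk/loop.py | _cooldown_remaining
-- ===== SOURCE A (Python) =====
-- def _cooldown_remaining(outcomes: list[str], cooldown_iterations: int) -> int:
--     last_failure_index = -1
--     for index, outcome in enumerate(outcomes):
--         if outcome in {"failure", "error", "reopen", "blocked"}:
--             last_failure_index = index
--     if last_failure_index < 0:
--         return 0
--     iterations_since_failure = len(outcomes) - last_failure_index - 1
--     return max(cooldown_iterations - iterations_since_failure, 0)
-- ===== SOURCE B (Python) =====
-- def _cooldown_remaining(outcomes: list[str], cooldown_iterations: int) -> int: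
--     for back, outcome in enumerate(reversed(outcomes)):
--         if outcome in {"failure", "error", "reopen", "blocked"}:
--             return max(cooldown_iterations - back, 0)
--     return 0
-- ===== Notes on version B (the rewrite author's own statement) =====
-- stated objective: simpler
-- what changed: Replaces the full forward scan that overwrites a running last-failure index (plus a post-loop arithmetic step) with a backward scan that returns max(cooldown - distance, 0) at the first failure seen from the end.
import Mathlib
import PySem

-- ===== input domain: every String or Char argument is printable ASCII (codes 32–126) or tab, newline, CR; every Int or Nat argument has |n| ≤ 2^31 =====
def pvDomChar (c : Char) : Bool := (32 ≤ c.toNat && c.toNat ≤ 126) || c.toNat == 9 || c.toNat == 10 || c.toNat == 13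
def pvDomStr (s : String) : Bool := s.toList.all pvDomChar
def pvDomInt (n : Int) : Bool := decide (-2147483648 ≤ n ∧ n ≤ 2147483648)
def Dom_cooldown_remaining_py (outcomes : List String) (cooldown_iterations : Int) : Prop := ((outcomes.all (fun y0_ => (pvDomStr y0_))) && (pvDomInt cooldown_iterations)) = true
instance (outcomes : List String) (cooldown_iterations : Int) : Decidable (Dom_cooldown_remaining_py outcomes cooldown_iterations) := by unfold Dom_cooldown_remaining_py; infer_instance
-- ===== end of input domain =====

-- B scans backward from the end and returns at the first failure outcome; A scans forward keeping the last failure index. Return values proved equal on all inputs.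

-- membership test `outcome in {"failure", "error", "reopen", "blocked"}`
def pvIsFail (o : String) : Bool :=
  o == "failure" || o == "error" || o == "reopen" || o == "blocked"

-- ===== PORT A =====
-- the forward `for index, outcome in enumerate(outcomes)` loop, carrying the running index and last_failure_index
def pvAGo : List String → Int → Int → Int
  | [], _, acc => acc
  | o :: rest, i, acc => pvAGo rest (i + 1) (if pvIsFail o then i else acc)

def cooldown_remaining_py (outcomes : List String) (cooldown_iterations : Int) : Int :=
  let last_failure_index := pvAGo outcomes 0 (-1)
  if last_failure_index < 0 then 0
  else
    let iterations_since_failure : Int := (outcomes.length : Int) - last_failure_index - 1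
    max (cooldown_iterations - iterations_since_failure) 0

-- ===== PORT B =====
-- the backward `for back, outcome in enumerate(reversed(outcomes))` loop with early return
def pvBGo : List String → Int → Int → Int
  | [], _, _ => 0
  | o :: rest, back, cd =>
      if pvIsFail o then max (cd - back) 0 else pvBGo rest (back + 1) cd

def cooldown_remaining_py_alt (outcomes : List String) (cooldown_iterations : Int) : Int :=
  pvBGo outcomes.reverse 0 cooldown_iterations

-- ===== PRECONDITION & SPEC =====
def Spec_cooldown_remaining_py (outcomes : List String) (cooldown_iterations : Int) (out : Int) : Prop := out = cooldown_remaining_py_alt outcomes cooldown_iterations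
instance (outcomes : List String) (cooldown_iterations : Int) (out : Int) : Decidable (Spec_cooldown_remaining_py outcomes cooldown_iterations out) := by unfold Spec_cooldown_remaining_py; infer_instance

-- ===== CLAIM (what is proved, stated in full; the proofs are below) =====
def Claim_equal_cooldown_remaining_py : Prop := ∀ (outcomes : List String) (cooldown_iterations : Int), Dom_cooldown_remaining_py outcomes cooldown_iterations → Spec_cooldown_remaining_py outcomes cooldown_iterations (cooldown_remaining_py outcomes cooldown_iterations)

-- ===== LEMMAS AND PROOFS =====

-- B's loop in terms of the first failure position in its (already reversed) argument
theorem pvBGo_eq_findIdx? (ys : List String) (back cd : Int) :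
    pvBGo ys back cd =
      match ys.findIdx? pvIsFail with
      | none => 0
      | some k => max (cd - back - (k : Int)) 0 := by
  induction ys generalizing back with
  | nil => simp [pvBGo]
  | cons o rest ih =>
    by_cases h : pvIsFail o = true
    · simp [pvBGo, h, List.findIdx?_cons]
    · simp only [pvBGo, if_neg h, List.findIdx?_cons, h, cond_false, ih (back + 1)]
      cases hf : rest.findIdx? pvIsFail with
      | none => simp
      | some k => simp; push_cast; ring_nf

-- A's loop in terms of the first failure position in the reversed list
theorem pvAGo_eq_findIdx? (xs : List String) (i acc : Int) :
    pvAGo xs i acc =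
      match xs.reverse.findIdx? pvIsFail with
      | none => acc
      | some k => i + ((xs.length : Int) - 1 - (k : Int)) := by
  induction xs generalizing i acc with
  | nil => simp [pvAGo]
  | cons o rest ih =>
    simp only [pvAGo, ih, List.reverse_cons]
    rw [List.findIdx?_append]
    cases hf : rest.reverse.findIdx? pvIsFail with
    | some k => simp; ring_nf
    | none =>
      have hnone : ∀ s ∈ rest, ¬ pvIsFail s = true := by
        intro s hs
        have := List.findIdx?_eq_none_iff.mp hf
        exact fun hc => by simpa [hc] using this s (List.mem_reverse.mpr hs)
      by_cases h : pvIsFail o = true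
      · simp [h, List.findIdx?_cons, List.length_reverse]
      · simp [h, List.findIdx?_cons]

theorem findIdx?_lt_length {α : Type} (p : α → Bool) (l : List α) (k : Nat)
    (h : l.findIdx? p = some k) : k < l.length := by
  have := List.findIdx?_eq_some_iff_findIdx_eq.mp h
  omega

-- ===== VERDICT (by name: the statement is the Claim_ definition above) =====
theorem cooldown_remaining_py_spec : Claim_equal_cooldown_remaining_py := by
  intro outcomes cd _
  show cooldown_remaining_py outcomes cd = cooldown_remaining_py_alt outcomes cd
  unfold cooldown_remaining_py cooldown_remaining_py_alt
  rw [pvAGo_eq_findIdx?, pvBGo_eq_findIdx?]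
  cases hf : outcomes.reverse.findIdx? pvIsFail with
  | none => simp
  | some k =>
    have hk : k < outcomes.length := by
      have := findIdx?_lt_length pvIsFail outcomes.reverse k hf
      simpa using this
    simp only
    have h0 : (0 : Int) + ((outcomes.length : Int) - 1 - (k : Int)) = (outcomes.length : Int) - 1 - (k : Int) := by ring
    rw [h0, if_neg (by omega)]
    have h1 : (outcomes.length : Int) - ((outcomes.length : Int) - 1 - (k : Int)) - 1 = (k : Int) := by ring
    rw [h1]
    ring_nf
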